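-- pv_equiv track=rewrite | github.com/oleksandr-medviediev/campus_2018_python | Lilia_Panchenko/3/Crypto_square.py | sqrt_int
-- ===== SOURCE A (Python) =====
-- def sqrt_int(value):
-- 	"""
-- 	calculates floor integer value, closest to square root to value
-- 	: param : value (int)
--
-- 	: return : square root of value
-- 	: rtype: int
-- 	"""
-- 	min_diff = value
-- 	root = 1
--
-- 	left = 0
-- 	right = value
--
-- 	while right - left > 1:
--
-- 		mid = (right + left) // 2
--
-- 		diff = abs(value - mid*mid)
-- 		if diff < min_diff:
-- 			root = mid
-- 			min_diff = diff
--
-- 		if value > mid * mid: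
-- 			left = mid
-- 		else:
-- 			right = mid
--
-- 	return root
-- ===== SOURCE B (Python) =====
-- def sqrt_int(value):
--     # floor square root by Newton's iteration, then pick the nearer of r and r+1
--     r = value
--     while r * r > value:
--         r = (r + value // r) // 2
--     return r if value - r * r < (r + 1) ** 2 - value else r + 1
-- ===== Notes on version B (the rewrite author's own statement) =====
-- stated objective: simpler
-- what changed: Replaces A's binary search over [0, value] that tracks the best squared distance with a Newton floor-square-root iteration followed by a single nearest-of-two comparison between r and r+1.
-- intended difference: For value == 0, A returns 1 (an artefact of initialising root to 1 and never testing 0 as a candidate), while B returns 0, the integer nearest to sqrt(0). — e.g. on sqrt_int(0): A returns 1, B returns 0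
-- outside the precondition, e.g. on sqrt_int(-1): A returns 1, B raises ZeroDivisionError; on sqrt_int(-3): A returns 1, B does not finish within the time limit
import Mathlib
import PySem

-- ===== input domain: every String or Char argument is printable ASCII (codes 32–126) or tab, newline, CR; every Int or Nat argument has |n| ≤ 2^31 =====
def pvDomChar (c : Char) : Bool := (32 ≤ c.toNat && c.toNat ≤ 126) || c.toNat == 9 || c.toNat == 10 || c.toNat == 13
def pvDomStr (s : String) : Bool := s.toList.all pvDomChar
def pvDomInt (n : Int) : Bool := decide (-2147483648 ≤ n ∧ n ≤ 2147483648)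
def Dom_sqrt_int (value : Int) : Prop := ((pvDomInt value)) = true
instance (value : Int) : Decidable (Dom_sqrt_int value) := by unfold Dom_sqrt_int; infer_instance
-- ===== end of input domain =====

-- B replaces A's binary search over [0, value] by a hand-written Newton floor-sqrt
-- iteration plus one nearest-of-two comparison (objective: simpler); equivalence is
-- about the return value, A mutates nothing.

-- ===== PORT A =====
-- midpoint strictly between left and right, used by the port's termination proof
theorem pvMidBounds (l r : Int) (h : r - l > 1) :
    l < PySem.Int.floordiv (r + l) 2 ∧ PySem.Int.floordiv (r + l) 2 < r := by
  constructor
  · have := (PySem.Int.le_floordiv_iff_mul_le (a := r + l) (b := 2) (q := l + 1) (by norm_num)).mpr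
      (by omega)
    omega
  · exact (PySem.Int.floordiv_lt_iff_lt_mul (a := r + l) (b := 2) (q := r) (by norm_num)).mpr
      (by omega)

def sqrtLoopA (value min_diff root left right : Int) : Int :=
  if h : right - left > 1 then
    let mid := PySem.Int.floordiv (right + left) 2
    let diff := |value - mid * mid|
    let root' := if diff < min_diff then mid else root
    let md' := if diff < min_diff then diff else min_diff
    if value > mid * mid then sqrtLoopA value md' root' mid right
    else sqrtLoopA value md' root' left mid
  else root
termination_by (right - left).toNat
decreasing_by
  · have := pvMidBounds left right h; omega
  · have := pvMidBounds left right h; omega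

def sqrt_int (value : Int) : Int := sqrtLoopA value value 1 0 value

-- ===== PORT B =====
-- termination of the Newton step (cited by the port's decreasing_by)
theorem pvNewtonStepLt (value r : Int) (h1 : r * r > value) (h2 : 0 < r) :
    PySem.Int.floordiv (r + PySem.Int.floordiv value r) 2 < r := by
  have hq : PySem.Int.floordiv value r < r :=
    (PySem.Int.floordiv_lt_iff_lt_mul (a := value) (b := r) (q := r) h2).mpr (by omega)
  exact (PySem.Int.floordiv_lt_iff_lt_mul (b := 2) (q := r) (by norm_num)).mpr (by omega)

-- '0 < r' only guards the division: on 0 ≤ value it always holds when the Python loop runs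
def newtonLoopB (value r : Int) : Int :=
  if h : r * r > value ∧ 0 < r then
    newtonLoopB value (PySem.Int.floordiv (r + PySem.Int.floordiv value r) 2)
  else r
termination_by r.toNat
decreasing_by
  have := pvNewtonStepLt value r h.1 h.2; omega

def sqrt_int_alt (value : Int) : Int :=
  let r := newtonLoopB value value
  if value - r * r < (r + 1) * (r + 1) - value then r else r + 1

-- ===== PRECONDITION & SPEC =====
-- Pre_ excludes negative values: A returns its initial sentinel root there by accident,
-- while B's own Newton iteration raises ZeroDivisionError or diverges on them.
def Pre_sqrt_int (value : Int) : Prop := 0 ≤ value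
instance (value : Int) : Decidable (Pre_sqrt_int value) := by unfold Pre_sqrt_int; infer_instance
def pvWitness_sqrt_int : Int := 9

-- For value == 0 A returns 1 (artefact of initialising root to 1 and never visiting 0),
-- while B returns 0, the integer nearest to sqrt(0), which is the intended value.
def D_sqrt_int (value : Int) : Prop := value = 0
instance (value : Int) : Decidable (D_sqrt_int value) := by unfold D_sqrt_int; infer_instance

def Spec_sqrt_int (value : Int) (out : Int) : Prop := ¬ D_sqrt_int value → out = sqrt_int_alt value
instance (value : Int) (out : Int) : Decidable (Spec_sqrt_int value out) := by unfold Spec_sqrt_int; infer_instance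

def pvDiffWitness_sqrt_int : Int := 0
def pvDiffWitnessOut_sqrt_int : Int × Int := (1, 0)

-- ===== CLAIM (what is proved, stated in full; the proofs are below) =====
def Claim_unchanged_sqrt_int : Prop := ∀ (value : Int), Dom_sqrt_int value → Pre_sqrt_int value → Spec_sqrt_int value (sqrt_int value)
def Claim_changed_sqrt_int : Prop := Dom_sqrt_int (pvDiffWitness_sqrt_int) ∧ Pre_sqrt_int (pvDiffWitness_sqrt_int) ∧ D_sqrt_int (pvDiffWitness_sqrt_int) ∧ sqrt_int (pvDiffWitness_sqrt_int) = pvDiffWitnessOut_sqrt_int.1 ∧ sqrt_int_alt (pvDiffWitness_sqrt_int) = pvDiffWitnessOut_sqrt_int.2 ∧ pvDiffWitnessOut_sqrt_int.1 ≠ pvDiffWitnessOut_sqrt_int.2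
def Claim_exact_sqrt_int : Prop := ∀ (value : Int), Dom_sqrt_int value → Pre_sqrt_int value → D_sqrt_int value → sqrt_int value ≠ sqrt_int_alt value

-- ===== LEMMAS AND PROOFS =====

-- the integer floor square root, as an Int
def sInt (value : Int) : Int := ((Nat.sqrt value.toNat : Nat) : Int)

theorem sInt_nonneg (value : Int) : 0 ≤ sInt value := by
  unfold sInt; exact Int.natCast_nonneg _

theorem sInt_sq_le (value : Int) (hv : 0 ≤ value) : sInt value * sInt value ≤ value := by
  have h : ((Nat.sqrt value.toNat : Nat) : Int) ^ 2 ≤ ((value.toNat : Nat) : Int) := by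
    exact_mod_cast Nat.sqrt_le' value.toNat
  rw [pow_two] at h
  simpa [sInt, Int.toNat_of_nonneg hv] using h

theorem lt_sInt_succ (value : Int) (hv : 0 ≤ value) :
    value < (sInt value + 1) * (sInt value + 1) := by
  have h : ((value.toNat : Nat) : Int) < (((Nat.sqrt value.toNat : Nat) : Int) + 1) ^ 2 := by
    exact_mod_cast Nat.lt_succ_sqrt' value.toNat
  rw [pow_two] at h
  simpa [sInt, Int.toNat_of_nonneg hv] using h

theorem sInt_le_self (value : Int) (hv : 0 ≤ value) : sInt value ≤ value := by
  have h1 := sInt_sq_le value hv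
  have h2 := sInt_nonneg value
  nlinarith

theorem newtonLoopB_eq (value : Int) (hv : 0 ≤ value) (r : Int) (hr : sInt value ≤ r) :
    newtonLoopB value r = sInt value := by
  have hs0 := sInt_nonneg value
  have hs1 := sInt_sq_le value hv
  have hs2 := lt_sInt_succ value hv
  rw [newtonLoopB]
  split_ifs with h
  · obtain ⟨hgt, hrpos⟩ := h
    have hq0 : (0 : Int) ≤ PySem.Int.floordiv value r :=
      (PySem.Int.le_floordiv_iff_mul_le hrpos).mpr (by nlinarith)
    have hq1 : PySem.Int.floordiv value r * r ≤ value :=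
      (PySem.Int.le_floordiv_iff_mul_le hrpos).mp (le_refl _)
    have hq2 : value < (PySem.Int.floordiv value r + 1) * r :=
      (PySem.Int.floordiv_lt_iff_lt_mul hrpos).mp (by omega)
    have hstep : sInt value ≤ PySem.Int.floordiv (r + PySem.Int.floordiv value r) 2 := by
      apply (PySem.Int.le_floordiv_iff_mul_le (by norm_num)).mpr
      nlinarith [sq_nonneg (PySem.Int.floordiv value r + 1 - r),
                 sq_nonneg (PySem.Int.floordiv value r + 1 + r - 2 * sInt value)]
    exact newtonLoopB_eq value hv _ hstep
  · by_cases hz : 0 < r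
    · have hle : r * r ≤ value := by
        by_contra hlt
        exact h ⟨by omega, hz⟩
      nlinarith
    · omega
termination_by r.toNat
decreasing_by
  have := pvNewtonStepLt value r h.1 h.2; omega

theorem alt_eq (value : Int) (hv : 0 ≤ value) :
    sqrt_int_alt value =
      if value - sInt value * sInt value < (sInt value + 1) * (sInt value + 1) - value
      then sInt value else sInt value + 1 := by
  have h := newtonLoopB_eq value hv value (sInt_le_self value hv)
  simp only [sqrt_int_alt, h]

-- characterisation of B's result: a strict nearest-square minimiser among the nonnegative ints
theorem near_min (value : Int) (hv : 1 ≤ value) (m : Int) (hm : 0 ≤ m)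
    (hne : m ≠ sqrt_int_alt value) :
    |value - sqrt_int_alt value * sqrt_int_alt value| < |value - m * m| := by
  have hs0 := sInt_nonneg value
  have hs1 := sInt_sq_le value (by omega)
  have hs2 := lt_sInt_succ value (by omega)
  have hs3 : 1 ≤ sInt value := by nlinarith
  rw [alt_eq value (by omega)] at hne ⊢
  split_ifs at hne ⊢ with hcond
  · -- N = s
    rw [abs_of_nonneg (by nlinarith)]
    rcases lt_or_gt_of_ne hne with hlt | hgt
    · have hmm : m * m ≤ (sInt value - 1) * (sInt value - 1) := by nlinarith
      rw [abs_of_nonneg (by nlinarith)]; nlinarith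
    · have hmm : (sInt value + 1) * (sInt value + 1) ≤ m * m := by nlinarith
      rw [abs_of_nonpos (by nlinarith)]; nlinarith
  · -- N = s + 1; the comparison cannot tie (parity)
    have hstrict : (sInt value + 1) * (sInt value + 1) - value < value - sInt value * sInt value := by
      have hne2 : value - sInt value * sInt value ≠ (sInt value + 1) * (sInt value + 1) - value := by
        have hsq : (sInt value + 1) * (sInt value + 1) = sInt value * sInt value + 2 * sInt value + 1 := by ring
        omega
      omega
    rw [abs_of_nonpos (by nlinarith)]
    rcases lt_or_gt_of_ne hne with hlt | hgt
    · have hmm : m * m ≤ sInt value * sInt value := by nlinarith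
      rw [abs_of_nonneg (by nlinarith)]; nlinarith
    · have hmm : (sInt value + 2) * (sInt value + 2) ≤ m * m := by nlinarith
      rw [abs_of_nonpos (by nlinarith)]; nlinarith

-- N is s or s+1, with its bracketing facts, packaged for the loop proof
theorem alt_bracket (value : Int) (hv : 1 ≤ value) :
    sInt value ≤ sqrt_int_alt value ∧ sqrt_int_alt value ≤ sInt value + 1 := by
  rw [alt_eq value (by omega)]
  split_ifs <;> omega

-- A's binary-search loop returns B's nearest root, by invariant
set_option maxHeartbeats 1000000 in
theorem loopA_eq (value : Int) (hv : 2 ≤ value) (md root l r : Int)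
    (h0 : 0 ≤ l) (h1 : l * l < value) (h2 : value ≤ r * r)
    (hinv : (root = sqrt_int_alt value ∧ md = |value - sqrt_int_alt value * sqrt_int_alt value|) ∨
            (l < sqrt_int_alt value ∧ sqrt_int_alt value < r ∧
             |value - sqrt_int_alt value * sqrt_int_alt value| < md)) :
    sqrtLoopA value md root l r = sqrt_int_alt value := by
  have hs0 := sInt_nonneg value
  have hs1 := sInt_sq_le value (by omega)
  have hs2 := lt_sInt_succ value (by omega)
  obtain ⟨hb1, hb2⟩ := alt_bracket value (by omega)
  rw [sqrtLoopA]
  split_ifs with hc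
  · obtain ⟨hm1, hm2⟩ := pvMidBounds l r hc
    simp only []
    set mid := PySem.Int.floordiv (r + l) 2 with hmid
    clear_value mid
    have hmid0 : 0 ≤ mid := by omega
    -- how the (diff < md) test resolves, by the invariant
    rcases hinv with ⟨hroot, hmd⟩ | ⟨hl, hr, hless⟩
    · -- root already is N: no mid can strictly improve
      have hnoupd : ¬ |value - mid * mid| < md := by
        by_cases hmn : mid = sqrt_int_alt value
        · rw [hmd, hmn]; omega
        · have := near_min value (by omega) mid hmid0 hmn
          omega
      rw [if_neg hnoupd, if_neg hnoupd]
      split_ifs with hdir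
      · exact loopA_eq value hv md root mid r hmid0 (by omega) h2 (Or.inl ⟨hroot, hmd⟩)
      · exact loopA_eq value hv md root l mid h0 h1 (by omega) (Or.inl ⟨hroot, hmd⟩)
    · -- N still strictly inside (l, r)
      by_cases hmn : mid = sqrt_int_alt value
      · -- mid hits N: the update fires and root becomes N for good
        have hupd : |value - mid * mid| < md := by rw [hmn]; omega
        rw [if_pos hupd, if_pos hupd]
        split_ifs with hdir
        · exact loopA_eq value hv _ mid mid r hmid0 (by omega) h2
            (Or.inl ⟨hmn, by rw [hmn]⟩)
        · exact loopA_eq value hv _ mid l mid h0 h1 (by omega)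
            (Or.inl ⟨hmn, by rw [hmn]⟩)
      · have hworse := near_min value (by omega) mid hmid0 hmn
        have hmlt : value > mid * mid → mid < sqrt_int_alt value := by
          intro hd
          by_contra hge
          have : sInt value + 1 ≤ mid := by omega
          nlinarith
        have hmgt : ¬ value > mid * mid → sqrt_int_alt value < mid := by
          intro hd
          by_contra hge
          have hmle : mid ≤ sInt value := by
            rcases (by omega : sqrt_int_alt value = sInt value ∨ sqrt_int_alt value = sInt value + 1) with he | he <;> omega
          rcases (by omega : mid ≤ sInt value - 1 ∨ mid = sInt value) with hm | hm
          · nlinarith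
          · -- mid = s and value ≤ s²: value = s², a perfect square, so N = s = mid
            have hveq : value = sInt value * sInt value := by nlinarith
            have : sqrt_int_alt value = sInt value := by
              rw [alt_eq value (by omega)]
              rw [if_pos (by nlinarith)]
            omega
        by_cases hdm : |value - mid * mid| < md
        · rw [if_pos hdm, if_pos hdm]
          split_ifs with hdir
          · exact loopA_eq value hv _ mid mid r hmid0 (by omega) h2
              (Or.inr ⟨hmlt hdir, hr, by omega⟩)
          · exact loopA_eq value hv _ mid l mid h0 h1 (by omega)
              (Or.inr ⟨hl, hmgt hdir, by omega⟩)
        · rw [if_neg hdm, if_neg hdm]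
          split_ifs with hdir
          · exact loopA_eq value hv md root mid r hmid0 (by omega) h2
              (Or.inr ⟨hmlt hdir, hr, by omega⟩)
          · exact loopA_eq value hv md root l mid h0 h1 (by omega)
              (Or.inr ⟨hl, hmgt hdir, by omega⟩)
  · -- loop over: the second disjunct needs r - l ≥ 2, so root = N
    rcases hinv with ⟨hroot, _⟩ | ⟨hl, hr, _⟩
    · exact hroot
    · omega
termination_by (r - l).toNat
decreasing_by
  all_goals omega

theorem sqrt_int_one : sqrt_int 1 = 1 := by
  rw [sqrt_int, sqrtLoopA]; norm_num

theorem alt_one : sqrt_int_alt 1 = 1 := by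
  have h : newtonLoopB 1 1 = 1 := by rw [newtonLoopB]; norm_num
  simp only [sqrt_int_alt, h]; norm_num

theorem sqrt_int_zero : sqrt_int 0 = 1 := by
  rw [sqrt_int, sqrtLoopA]; norm_num

theorem alt_zero : sqrt_int_alt 0 = 0 := by
  have h : newtonLoopB 0 0 = 0 := by rw [newtonLoopB]; norm_num
  simp only [sqrt_int_alt, h]; norm_num

-- ===== VERDICT (by name: the statement is the Claim_ definition above) =====
theorem sqrt_int_spec : Claim_unchanged_sqrt_int := by
  intro value _ hpre
  unfold Spec_sqrt_int
  intro hnd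
  unfold Pre_sqrt_int at hpre
  unfold D_sqrt_int at hnd
  by_cases h1 : value = 1
  · subst h1; rw [sqrt_int_one, alt_one]
  · -- value ≥ 2: the binary search meets its invariant from the start
    have hv2 : 2 ≤ value := by omega
    have hs0 := sInt_nonneg value
    have hs1 := sInt_sq_le value (by omega)
    have hs2 := lt_sInt_succ value (by omega)
    have hs3 : 1 ≤ sInt value := by nlinarith
    obtain ⟨hb1, hb2⟩ := alt_bracket value (by omega)
    have hNlt : sqrt_int_alt value < value := by
      -- s = 1 ⇒ value ∈ {2,3}; s ≥ 2 ⇒ N ≤ s + 1 < s² ≤ value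
      rcases (by omega : sInt value = 1 ∨ 2 ≤ sInt value) with hs | hs
      · have hv3 : value ≤ 3 := by nlinarith
        rcases (by omega : value = 2 ∨ value = 3) with hv' | hv'
        · have hcond : value - sInt value * sInt value < (sInt value + 1) * (sInt value + 1) - value := by
            rw [hs]; omega
          have halt := alt_eq value (by omega)
          rw [if_pos hcond] at halt
          omega
        · omega
      · nlinarith
    have hdiff : |value - sqrt_int_alt value * sqrt_int_alt value| < value := by
      rcases (by omega : sqrt_int_alt value = sInt value ∨ sqrt_int_alt value = sInt value + 1) with he | he
      · rw [he, abs_of_nonneg (by nlinarith)]; nlinarith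
      · rw [he, abs_of_nonpos (by nlinarith)]
        have h' := near_min value (by omega) (sInt value) (by omega) (by omega)
        rw [he, abs_of_nonpos (by nlinarith), abs_of_nonneg (by nlinarith)] at h'
        nlinarith
    exact loopA_eq value hv2 value 1 0 value (by omega) (by omega) (by nlinarith)
      (Or.inr ⟨by omega, hNlt, hdiff⟩)

theorem sqrt_int_changed : Claim_changed_sqrt_int := by
  unfold Claim_changed_sqrt_int
  refine ⟨by decide, by decide, by decide, sqrt_int_zero, alt_zero, by decide⟩

theorem sqrt_int_tight : Claim_exact_sqrt_int := by
  intro value _ _ hD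
  unfold D_sqrt_int at hD
  subst hD
  rw [sqrt_int_zero, alt_zero]
  decide
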